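-- pv_equiv track=rewrite | github.com/changzhisun/entrel-joint-mrt | lib/mpqa_data_preprocess.py | get_opinions
-- ===== SOURCE A (Python) =====
-- def get_opinions(sent_tag, opin_str):
--     ret_indices = []
--     ret_tag = []
--     i = 0
--     while i < len(sent_tag):
--         if sent_tag[i].startswith("B_" + opin_str):
--             ret_tag.append(sent_tag[i])
--             indices = [i]
--             i += 1
--             while i < len(sent_tag) and sent_tag[i].startswith(opin_str):
--                 indices.append(i)
--                 i += 1
--             ret_indices.append(indices)
--         else:
--             i += 1
--     return ret_indices, ret_tag
-- ===== SOURCE B (Python) =====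
-- def get_opinions(sent_tag, opin_str):
--     # Two-stage algorithm: a backward pass precomputes, for every position i,
--     # reach[i] = the exclusive end of the greedy continuation run right after i;
--     # a forward pass then emits each span in O(1) by jumping straight to reach[i].
--     n = len(sent_tag)
--     b_pref = "B_" + opin_str
--     cont = [t.startswith(opin_str) for t in sent_tag]
--     reach = [0] * n
--     for i in range(n - 1, -1, -1):
--         reach[i] = reach[i + 1] if i + 1 < n and cont[i + 1] else i + 1
--     ret_indices = []
--     ret_tag = []
--     i = 0
--     while i < n:
--         if sent_tag[i].startswith(b_pref):
--             ret_indices.append(list(range(i, reach[i])))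
--             ret_tag.append(sent_tag[i])
--             i = reach[i]
--         else:
--             i += 1
--     return ret_indices, ret_tag
-- ===== Notes on version B (the rewrite author's own statement) =====
-- stated objective: faster
-- what changed: Replaces the nested-while scan by a two-stage algorithm: a backward pass precomputes a reach[] jump table (exclusive end of the continuation run after each position) from a once-computed cont[] classification, and a forward pass emits each span as range(i, reach[i]) and jumps; the 'B_'+opin_str concatenation and repeated prefix tests are hoisted out of the loop.
import Mathlib
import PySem

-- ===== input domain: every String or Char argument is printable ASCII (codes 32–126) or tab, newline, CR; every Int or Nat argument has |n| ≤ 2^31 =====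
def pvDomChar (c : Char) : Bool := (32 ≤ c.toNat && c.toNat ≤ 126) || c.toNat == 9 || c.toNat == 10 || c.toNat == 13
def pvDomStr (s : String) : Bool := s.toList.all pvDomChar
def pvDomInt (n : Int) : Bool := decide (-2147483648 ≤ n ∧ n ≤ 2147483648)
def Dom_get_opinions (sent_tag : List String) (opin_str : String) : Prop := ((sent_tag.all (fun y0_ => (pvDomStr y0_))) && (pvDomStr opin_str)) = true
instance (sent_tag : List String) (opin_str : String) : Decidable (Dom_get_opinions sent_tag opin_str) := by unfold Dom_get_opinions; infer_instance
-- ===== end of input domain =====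

-- B replaces A's nested-while scan by a backward pass building a reach[] jump table
-- plus a forward pass that emits each span as range(i, reach[i]) (alternative algorithm; return value only).

-- ===== PORT A =====
-- inner while: collect consecutive indices whose tag startswith opin_str; returns (indices, remaining tags, next index)
def goInnerA (ts : List String) (j : Int) (o : String) : List Int × List String × Int :=
  match ts with
  | [] => ([], [], j)
  | t :: ts' =>
    if PySem.Str.startswith t o then
      let r := goInnerA ts' (j + 1) o
      (j :: r.1, r.2)
    else ([], t :: ts', j)

theorem goInnerA_rest_le (ts : List String) (j : Int) (o : String) :
    (goInnerA ts j o).2.1.length ≤ ts.length := by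
  induction ts generalizing j with
  | nil => simp [goInnerA]
  | cons t ts ih =>
    simp only [goInnerA]
    split
    · exact le_trans (ih _) (Nat.le_succ _)
    · simp

-- outer while
def goOuterA (ts : List String) (i : Int) (o : String) : List (List Int) × List String :=
  match h : ts with
  | [] => ([], [])
  | t :: ts' =>
    if PySem.Str.startswith t ("B_" ++ o) then
      let r := goInnerA ts' (i + 1) o
      let p := goOuterA r.2.1 r.2.2 o
      ((i :: r.1) :: p.1, t :: p.2)
    else goOuterA ts' (i + 1) o
termination_by ts.length
decreasing_by
  · have := goInnerA_rest_le ts' (i + 1) o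
    simp; omega
  · simp

def get_opinions (sent_tag : List String) (opin_str : String) : List (List Int) × List String :=
  goOuterA sent_tag 0 opin_str

-- ===== PORT B =====
-- backward pass of Source B: reach[i] = reach[i+1] if i+1 < n and cont[i+1] else i+1,
-- built right-to-left over the cont list for the suffix starting at absolute index i
-- 'reach[i+1] if i+1 < n and cont[i+1] else i+1' (rest/rs are the cont/reach lists after i)
def reachHead (rest : List Bool) (rs : List Int) (d : Int) : Int :=
  match rest, rs with
  | true :: _, r :: _ => r
  | _, _ => d

def reachB (c : List Bool) (i : Int) : List Int :=
  match c with
  | [] => []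
  | _ :: rest => reachHead rest (reachB rest (i + 1)) (i + 1) :: reachB rest (i + 1)

-- forward pass of Source B: walks sent_tag and reach in step; 'i = reach[i]' is ported as
-- dropping (reach[i] - (i+1)) elements from both lists
def jumpB (ts : List String) (rch : List Int) (i : Int) (bp : String) :
    List (List Int) × List String :=
  match ts, rch with
  | [], _ => ([], [])
  | t :: ts', [] =>
    if PySem.Str.startswith t bp then
      let p := jumpB ts' [] (i + 1) bp
      (PySem.List.pyRange i (i + 1) 1 :: p.1, t :: p.2)
    else jumpB ts' [] (i + 1) bp
  | t :: ts', r :: rs =>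
    if PySem.Str.startswith t bp then
      let k := (r - (i + 1)).toNat
      let p := jumpB (ts'.drop k) (rs.drop k) r bp
      (PySem.List.pyRange i r 1 :: p.1, t :: p.2)
    else jumpB ts' rs (i + 1) bp
termination_by ts.length
decreasing_by
  all_goals simp

def get_opinions_alt (sent_tag : List String) (opin_str : String) : List (List Int) × List String :=
  jumpB sent_tag (reachB (sent_tag.map (fun t => PySem.Str.startswith t opin_str)) 0) 0
    ("B_" ++ opin_str)

-- ===== PRECONDITION & SPEC =====
def Spec_get_opinions (sent_tag : List String) (opin_str : String) (out : List (List Int) × List String) : Prop := out = get_opinions_alt sent_tag opin_str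
instance (sent_tag : List String) (opin_str : String) (out : List (List Int) × List String) : Decidable (Spec_get_opinions sent_tag opin_str out) := by unfold Spec_get_opinions; infer_instance

-- ===== CLAIM (what is proved, stated in full; the proofs are below) =====
def Claim_equal_get_opinions : Prop := ∀ (sent_tag : List String) (opin_str : String), Dom_get_opinions sent_tag opin_str → Spec_get_opinions sent_tag opin_str (get_opinions sent_tag opin_str)

-- ===== LEMMAS AND PROOFS =====

-- the inner run's exit index is start plus its length
theorem goInnerA_idx (ts : List String) (j : Int) (o : String) :
    (goInnerA ts j o).2.2 = j + (goInnerA ts j o).1.length := by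
  induction ts generalizing j with
  | nil => simp [goInnerA]
  | cons t ts ih =>
    simp only [goInnerA]
    split
    · simp [ih (j + 1)]; omega
    · simp

-- the inner run leaves exactly the tags after the consumed prefix
theorem goInnerA_rest (ts : List String) (j : Int) (o : String) :
    (goInnerA ts j o).2.1 = ts.drop (goInnerA ts j o).1.length := by
  induction ts generalizing j with
  | nil => simp [goInnerA]
  | cons t ts ih =>
    simp only [goInnerA]
    split
    · simp [ih (j + 1)]
    · simp

-- the inner run's indices are the integer range from its start to its exit index
theorem goInnerA_range (ts : List String) (j : Int) (o : String) :
    (goInnerA ts j o).1 = PySem.List.pyRange j (goInnerA ts j o).2.2 1 := by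
  induction ts generalizing j with
  | nil => simp [goInnerA]
  | cons t ts ih =>
    simp only [goInnerA]
    split
    · have hidx := goInnerA_idx ts (j + 1) o
      have hlt : j < (goInnerA ts (j + 1) o).2.2 := by omega
      simp only []
      rw [PySem.List.pyRange_one_cons hlt, ih (j + 1)]
    · simp

-- head of the reach list is the inner run's exit index; tail is the reach list of the suffix
theorem reachB_cons (b : Bool) (ts : List String) (i : Int) (o : String) :
    reachB (b :: ts.map (fun u => PySem.Str.startswith u o)) i
      = (goInnerA ts (i + 1) o).2.2
          :: reachB (ts.map (fun u => PySem.Str.startswith u o)) (i + 1) := by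
  induction ts generalizing b i with
  | nil => simp [reachB, reachHead, goInnerA]
  | cons u us ih =>
    simp only [List.map]
    rw [show reachB (b :: PySem.Str.startswith u o :: us.map (fun u => PySem.Str.startswith u o)) i
        = reachHead (PySem.Str.startswith u o :: us.map (fun u => PySem.Str.startswith u o))
            (reachB (PySem.Str.startswith u o :: us.map (fun u => PySem.Str.startswith u o)) (i + 1))
            (i + 1)
          :: reachB (PySem.Str.startswith u o :: us.map (fun u => PySem.Str.startswith u o)) (i + 1)
      from rfl]
    rw [ih (PySem.Str.startswith u o) (i + 1)]
    congr 1
    by_cases hu : PySem.Chars.startswith u.toList o.toList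
    · simp [reachHead, hu, goInnerA]
    · simp [reachHead, hu, goInnerA]

-- dropping k from a reach list is the reach list of the dropped suffix
theorem reachB_drop (c : List Bool) (i : Int) (k : Nat) :
    (reachB c i).drop k = reachB (c.drop k) (i + k) := by
  induction k generalizing c i with
  | zero => simp
  | succ k ih =>
    cases c with
    | nil => simp [reachB]
    | cons b rest =>
      simp only [reachB, List.drop_succ_cons]
      rw [ih rest (i + 1)]
      congr 1
      push_cast
      ring

-- main simulation, by strong induction on the length bound
theorem jump_sim (n : ℕ) (ts : List String) (hn : ts.length ≤ n) (i : Int) (o : String) :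
    jumpB ts (reachB (ts.map (fun u => PySem.Str.startswith u o)) i) i ("B_" ++ o)
      = goOuterA ts i o := by
  induction n generalizing ts i with
  | zero =>
    have : ts = [] := List.length_eq_zero_iff.mp (Nat.le_zero.mp hn)
    subst this; simp [jumpB, reachB, goOuterA]
  | succ n ih =>
    match ts with
    | [] => simp [jumpB, reachB, goOuterA]
    | t :: ts' =>
      simp only [List.map]
      rw [reachB_cons]
      by_cases hb : PySem.Str.startswith t ("B_" ++ o)
      · simp only [jumpB, goOuterA, hb, if_true]
        have hidx := goInnerA_idx ts' (i + 1) o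
        have hrest := goInnerA_rest ts' (i + 1) o
        have hk : ((goInnerA ts' (i + 1) o).2.2 - (i + 1)).toNat
            = (goInnerA ts' (i + 1) o).1.length := by omega
        have hdropR := reachB_drop (ts'.map (fun u => PySem.Str.startswith u o)) (i + 1)
            ((goInnerA ts' (i + 1) o).2.2 - (i + 1)).toNat
        have hrng : PySem.List.pyRange i (goInnerA ts' (i + 1) o).2.2 1
            = i :: (goInnerA ts' (i + 1) o).1 := by
          rw [PySem.List.pyRange_one_cons (by omega), ← goInnerA_range]
        have hlen : (goInnerA ts' (i + 1) o).2.1.length ≤ n := by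
          rw [hrest]
          simp only [List.length_drop]
          have : ts'.length ≤ n := by simpa using hn
          omega
        rw [hdropR, ← List.map_drop, hk, ← hrest, ← hidx,
          ih _ hlen _, hrng]
      · simp only [jumpB, goOuterA, hb]
        exact ih ts' (by simpa using hn) (i + 1)

-- ===== VERDICT (by name: the statement is the Claim_ definition above) =====
theorem get_opinions_spec : Claim_equal_get_opinions := by
  intro sent_tag opin_str _
  unfold Spec_get_opinions get_opinions get_opinions_alt
  rw [jump_sim sent_tag.length sent_tag le_rfl]
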